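-- pv_equiv track=rewrite | github.com/vhsw/Advent-of-Code | 2022/Day 25/full_of_hot_air.py | parse_snafu
-- ===== SOURCE A (Python) =====
-- def parse_snafu(data: str):
--     nums = {
--         "2": 2,
--         "1": 1,
--         "0": 0,
--         "-": -1,
--         "=": -2,
--     }
--     result = 0
--     for char in data:
--         num = nums[char]
--         result *= 5
--         result += num
--     return result
-- ===== SOURCE B (Python) =====
-- def parse_snafu(data: str):
--     nums = {
--         "2": 2,
--         "1": 1,
--         "0": 0,
--         "-": -1,
--         "=": -2,
--     }
--     result = 0
--     power = 1
--     for char in reversed(data):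
--         result += nums[char] * power
--         power *= 5
--     return result
-- ===== Notes on version B (the rewrite author's own statement) =====
-- stated objective: alternative
-- what changed: Replaces Horner's left-to-right evaluation (result = result*5 + digit) by a right-to-left weighted sum that iterates the string in reverse, keeping an explicit place-value power accumulator multiplied by 5 each step.
import Mathlib
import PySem

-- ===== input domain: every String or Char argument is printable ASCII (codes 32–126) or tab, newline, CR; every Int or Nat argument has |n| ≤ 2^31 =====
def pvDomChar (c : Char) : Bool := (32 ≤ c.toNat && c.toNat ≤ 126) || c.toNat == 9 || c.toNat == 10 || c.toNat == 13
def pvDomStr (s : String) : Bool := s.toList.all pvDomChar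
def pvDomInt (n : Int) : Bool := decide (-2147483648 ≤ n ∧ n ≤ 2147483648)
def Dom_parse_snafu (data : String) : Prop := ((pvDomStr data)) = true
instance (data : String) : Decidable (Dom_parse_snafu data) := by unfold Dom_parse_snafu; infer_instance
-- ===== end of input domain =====

-- B replaces Horner's left-to-right evaluation by a reversed traversal with an explicit
-- place-value power accumulator (objective: alternative decomposition, same cost).

-- ===== PORT A =====
-- the nums dict of both Pythons
def pvNums : PySem.Dict Char Int :=
  PySem.Dict.ofList [('2', 2), ('1', 1), ('0', 0), ('-', -1), ('=', -2)]

-- A: result = 0; for char in data: result = result*5 + nums[char]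
-- nums[char] raises KeyError on non-digit characters; Pre_ excludes those, so getD is exact on Pre_.
def parse_snafu (data : String) : Int :=
  data.toList.foldl (fun result char => result * 5 + PySem.Dict.getD pvNums char 0) 0

-- ===== PORT B =====
-- B: result = 0; power = 1; for char in reversed(data): result += nums[char]*power; power *= 5
def parse_snafu_alt (data : String) : Int :=
  (data.toList.reverse.foldl
    (fun (st : Int × Int) char => (st.1 + PySem.Dict.getD pvNums char 0 * st.2, st.2 * 5))
    (0, 1)).1

-- ===== PRECONDITION & SPEC =====
-- Pre_ excludes strings containing a character that is not a SNAFU digit (a key of nums),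
-- on which both Pythons raise KeyError.
def Pre_parse_snafu (data : String) : Prop :=
  data.toList.all (fun c => c == '2' || c == '1' || c == '0' || c == '-' || c == '=') = true
instance (data : String) : Decidable (Pre_parse_snafu data) := by
  unfold Pre_parse_snafu; infer_instance
def pvWitness_parse_snafu : String := "2"

def Spec_parse_snafu (data : String) (out : Int) : Prop := out = parse_snafu_alt data
instance (data : String) (out : Int) : Decidable (Spec_parse_snafu data out) := by
  unfold Spec_parse_snafu; infer_instance

-- ===== CLAIM (what is proved, stated in full; the proofs are below) =====
def Claim_equal_parse_snafu : Prop :=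
  ∀ (data : String), Dom_parse_snafu data → Pre_parse_snafu data →
    Spec_parse_snafu data (parse_snafu data)

-- ===== LEMMAS AND PROOFS =====

-- abbreviations for the two loop bodies (proof-local)
def pvHorner (l : List Char) (a : Int) : Int :=
  l.foldl (fun result char => result * 5 + PySem.Dict.getD pvNums char 0) a

def pvPow (l : List Char) (st : Int × Int) : Int × Int :=
  l.foldl (fun (st : Int × Int) char => (st.1 + PySem.Dict.getD pvNums char 0 * st.2, st.2 * 5)) st

theorem pvHorner_append_one (xs : List Char) (c : Char) :
    pvHorner (xs ++ [c]) 0 = pvHorner xs 0 * 5 + PySem.Dict.getD pvNums c 0 := by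
  simp [pvHorner, List.foldl_append]

theorem pvPow_fst (l : List Char) (r p : Int) :
    (pvPow l (r, p)).1 = r + p * pvHorner l.reverse 0 := by
  induction l generalizing r p with
  | nil => simp [pvPow, pvHorner]
  | cons c t ih =>
    simp only [pvPow, List.foldl_cons, List.reverse_cons]
    rw [show (t.foldl (fun (st : Int × Int) char =>
          (st.1 + PySem.Dict.getD pvNums char 0 * st.2, st.2 * 5))
          (r + PySem.Dict.getD pvNums c 0 * p, p * 5)) =
        pvPow t (r + PySem.Dict.getD pvNums c 0 * p, p * 5) from rfl,
        ih, pvHorner_append_one]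
    ring

-- ===== VERDICT (by name: the statement is the Claim_ definition above) =====
theorem parse_snafu_spec : Claim_equal_parse_snafu := by
  intro data _ _
  unfold Spec_parse_snafu parse_snafu parse_snafu_alt
  have h := pvPow_fst data.toList.reverse 0 1
  simp only [List.reverse_reverse] at h
  simpa [pvPow, pvHorner] using h.symm
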